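-- pv_equiv track=rewrite | github.com/kchand12/MediaMatch | src/model_framework.py | extract_genre
-- ===== SOURCE A (Python) =====
-- def extract_genre(sentence):
--     # Define a list of possible genres and keywords associated with them
--     genres = {
--         "comedy": ["comedy", "comedies", "funny", "humor"],
--         "horror": ["horror", "scary", "frightening", "terror"],
--         "sci-fi": ["sci-fi", "science fiction", "sci fi", "space", "futuristic"],
--         "romance": ["romance", "romantic", "love", "lovestory", "love story"],
--         "action": ["action", "fast-paced", "thrill", "exciting", "adventure"],
--         "animation": ["animation", "animated", "cartoon", "anime"],
--         "thriller": ["thriller", "suspense", "tense", "mystery"],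
--         "documentary": ["documentary", "docu", "real life", "true story"],
--         "drama": ["drama", "dramatic", "serious", "emotional"],
--         "adventure": ["adventure", "explore", "exploration", "journey"],
--         "history": ["history", "historical", "past", "period"],
--         "fantasy": ["fantasy", "magical", "fairy tale", "mythical"]
--         # Add more genres and their keywords as needed
--     }
--
--     # Tokenize the sentence and convert to lower case
--     words = sentence.lower().split()
--     # Check each word in the sentence to see if it matches a genre keyword
--     for word in words:
--         for genre, keywords in genres.items():
--             if word in keywords:
--                 return genre
--     return None
-- ===== SOURCE B (Python) =====
-- # Flat keyword->genre table (genre order of the original spec; the duplicate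
-- # keyword "adventure" is listed first with "action", so the earlier pair wins).
-- _KEYWORD_GENRE_PAIRS = [
--     ("comedy", "comedy"), ("comedies", "comedy"), ("funny", "comedy"), ("humor", "comedy"),
--     ("horror", "horror"), ("scary", "horror"), ("frightening", "horror"), ("terror", "horror"),
--     ("sci-fi", "sci-fi"), ("science fiction", "sci-fi"), ("sci fi", "sci-fi"), ("space", "sci-fi"), ("futuristic", "sci-fi"),
--     ("romance", "romance"), ("romantic", "romance"), ("love", "romance"), ("lovestory", "romance"), ("love story", "romance"),
--     ("action", "action"), ("fast-paced", "action"), ("thrill", "action"), ("exciting", "action"), ("adventure", "action"),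
--     ("animation", "animation"), ("animated", "animation"), ("cartoon", "animation"), ("anime", "animation"),
--     ("thriller", "thriller"), ("suspense", "thriller"), ("tense", "thriller"), ("mystery", "thriller"),
--     ("documentary", "documentary"), ("docu", "documentary"), ("real life", "documentary"), ("true story", "documentary"),
--     ("drama", "drama"), ("dramatic", "drama"), ("serious", "drama"), ("emotional", "drama"),
--     ("adventure", "adventure"), ("explore", "adventure"), ("exploration", "adventure"), ("journey", "adventure"),
--     ("history", "history"), ("historical", "history"), ("past", "history"), ("period", "history"),
--     ("fantasy", "fantasy"), ("magical", "fantasy"), ("fairy tale", "fantasy"), ("mythical", "fantasy"),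
-- ]
--
-- def _first_pos(words, kw):
--     try:
--         return words.index(kw)
--     except ValueError:
--         return None
--
-- def extract_genre(sentence):
--     words = sentence.lower().split()
--     best_i, best = len(words), None
--     for kw, genre in _KEYWORD_GENRE_PAIRS:
--         i = _first_pos(words, kw)
--         if i is not None and i < best_i:
--             best_i, best = i, genre
--     return best
-- ===== Notes on version B (the rewrite author's own statement) =====
-- stated objective: alternative
-- what changed: B inverts A's loop nesting: instead of scanning every genre's keyword list for each word in turn, it makes one pass over a flat keyword-to-genre table and keeps the pair whose keyword has the minimal first position in the word list (strict improvement, so the earlier table entry - 'adventure'->'action' - wins ties).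
import Mathlib
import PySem

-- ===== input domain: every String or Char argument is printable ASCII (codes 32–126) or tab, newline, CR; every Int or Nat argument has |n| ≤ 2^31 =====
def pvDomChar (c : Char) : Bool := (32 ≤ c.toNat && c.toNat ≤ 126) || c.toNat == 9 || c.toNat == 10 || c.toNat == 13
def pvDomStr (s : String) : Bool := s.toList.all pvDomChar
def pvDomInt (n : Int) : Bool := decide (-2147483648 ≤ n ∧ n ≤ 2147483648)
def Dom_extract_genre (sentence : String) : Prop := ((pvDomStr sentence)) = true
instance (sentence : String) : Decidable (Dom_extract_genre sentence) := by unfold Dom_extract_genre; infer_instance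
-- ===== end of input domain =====

-- B inverts A's loop order: instead of scanning the genre lists for each word, it makes
-- one pass over a flat keyword→genre table, minimizing each keyword's first position in
-- the word list (strict improvement, so the earlier table entry wins ties) (objective: alternative).

-- ===== PORT A =====
-- the literal genres dict of A
def pvGenres : List (String × List String) :=
  [ ("comedy", ["comedy", "comedies", "funny", "humor"]),
    ("horror", ["horror", "scary", "frightening", "terror"]),
    ("sci-fi", ["sci-fi", "science fiction", "sci fi", "space", "futuristic"]),
    ("romance", ["romance", "romantic", "love", "lovestory", "love story"]),
    ("action", ["action", "fast-paced", "thrill", "exciting", "adventure"]),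
    ("animation", ["animation", "animated", "cartoon", "anime"]),
    ("thriller", ["thriller", "suspense", "tense", "mystery"]),
    ("documentary", ["documentary", "docu", "real life", "true story"]),
    ("drama", ["drama", "dramatic", "serious", "emotional"]),
    ("adventure", ["adventure", "explore", "exploration", "journey"]),
    ("history", ["history", "historical", "past", "period"]),
    ("fantasy", ["fantasy", "magical", "fairy tale", "mythical"]) ]

-- inner loop of A: first genre whose keyword list contains the word
def pvScanGenres : List (String × List String) → String → Option String
  | [], _ => none
  | (genre, keywords) :: rest, word =>
      if keywords.contains word then some genre else pvScanGenres rest word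

-- outer loop of A over the words
def pvLoopA : List String → Option String
  | [] => none
  | word :: ws =>
      match pvScanGenres pvGenres word with
      | some genre => some genre
      | none => pvLoopA ws

def extract_genre (sentence : String) : Option String :=
  pvLoopA (PySem.Str.split₀ (PySem.Str.lower sentence))

-- ===== PORT B =====
-- B's flat keyword→genre table (_KEYWORD_GENRE_PAIRS)
def pvPairs : List (String × String) :=
  [ ("comedy", "comedy"), ("comedies", "comedy"), ("funny", "comedy"), ("humor", "comedy"),
    ("horror", "horror"), ("scary", "horror"), ("frightening", "horror"), ("terror", "horror"),
    ("sci-fi", "sci-fi"), ("science fiction", "sci-fi"), ("sci fi", "sci-fi"), ("space", "sci-fi"), ("futuristic", "sci-fi"),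
    ("romance", "romance"), ("romantic", "romance"), ("love", "romance"), ("lovestory", "romance"), ("love story", "romance"),
    ("action", "action"), ("fast-paced", "action"), ("thrill", "action"), ("exciting", "action"), ("adventure", "action"),
    ("animation", "animation"), ("animated", "animation"), ("cartoon", "animation"), ("anime", "animation"),
    ("thriller", "thriller"), ("suspense", "thriller"), ("tense", "thriller"), ("mystery", "thriller"),
    ("documentary", "documentary"), ("docu", "documentary"), ("real life", "documentary"), ("true story", "documentary"),
    ("drama", "drama"), ("dramatic", "drama"), ("serious", "drama"), ("emotional", "drama"),
    ("adventure", "adventure"), ("explore", "adventure"), ("exploration", "adventure"), ("journey", "adventure"),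
    ("history", "history"), ("historical", "history"), ("past", "history"), ("period", "history"),
    ("fantasy", "fantasy"), ("magical", "fantasy"), ("fairy tale", "fantasy"), ("mythical", "fantasy") ]

-- _first_pos(words, kw): words.index(kw) or None  →  PySem.List.index?
-- body of B's for loop: keep the pair whose keyword occurs earliest (strict <)
def pvStepB (words : List String) (acc : Nat × Option String) (p : String × String) :
    Nat × Option String :=
  match PySem.List.index? words p.1 with
  | some i => if i < acc.1 then (i, some p.2) else acc
  | none => acc

def extract_genre_alt (sentence : String) : Option String :=
  let words := PySem.Str.split₀ (PySem.Str.lower sentence)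
  (pvPairs.foldl (pvStepB words) (words.length, none)).2

-- ===== PRECONDITION & SPEC =====
def Spec_extract_genre (sentence : String) (out : Option String) : Prop := out = extract_genre_alt sentence
instance (sentence : String) (out : Option String) : Decidable (Spec_extract_genre sentence out) := by unfold Spec_extract_genre; infer_instance

-- ===== CLAIM (what is proved, stated in full; the proofs are below) =====
def Claim_equal_extract_genre : Prop := ∀ (sentence : String), Dom_extract_genre sentence → Spec_extract_genre sentence (extract_genre sentence)

-- ===== LEMMAS AND PROOFS =====

-- on the empty word list every index? is none: the fold leaves the accumulator alone
theorem pv_fold_nil (L : List (String × String)) (acc : Nat × Option String) :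
    L.foldl (pvStepB []) acc = acc := by
  induction L generalizing acc with
  | nil => rfl
  | cons p L ih => simp [pvStepB, PySem.List.index?_eq_idxOf?, ih]

-- once the best index is 0 no later pair can improve it
theorem pv_fold_zero (ws : List String) (L : List (String × String)) (bg : Option String) :
    L.foldl (pvStepB ws) (0, bg) = (0, bg) := by
  induction L with
  | nil => rfl
  | cons p L ih =>
    simp only [List.foldl_cons, pvStepB]
    cases h : PySem.List.index? ws p.1 with
    | none => exact ih
    | some i => simp [ih]

-- if some pair's keyword is the head word, the fold returns the FIRST such pair's genre
theorem pv_fold_hit (w : String) (ws : List String) (L : List (String × String))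
    (bi : Nat) (bg : Option String) (hbi : 0 < bi) (p0 : String × String)
    (hf : L.find? (fun p => p.1 == w) = some p0) :
    (L.foldl (pvStepB (w :: ws)) (bi, bg)).2 = some p0.2 := by
  induction L generalizing bi bg with
  | nil => simp at hf
  | cons p L ih =>
    by_cases hw : p.1 = w
    · have hf0 : p0 = p := by
        rw [List.find?_cons_of_pos (by simp [hw])] at hf
        exact (Option.some.inj hf).symm
      subst hf0
      simp only [List.foldl_cons, pvStepB, hw, PySem.List.index?_cons_self]
      rw [if_pos hbi, pv_fold_zero]
    · rw [List.find?_cons_of_neg (by simp [hw])] at hf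
      have hidx := PySem.List.index?_cons_of_ne (x := w) (v := p.1) ws (fun h => hw h.symm)
      simp only [List.foldl_cons, pvStepB, hidx]
      cases h : PySem.List.index? ws p.1 with
      | none => simp only [Option.map_none]; exact ih bi bg hbi hf
      | some j =>
        simp only [Option.map_some]
        by_cases hj : j + 1 < bi
        · rw [if_pos hj]; exact ih (j + 1) (some p.2) (Nat.succ_pos j) hf
        · rw [if_neg hj]; exact ih bi bg hbi hf

-- if no pair's keyword is the head word, dropping the head shifts every index by one
theorem pv_fold_shift (w : String) (ws : List String) (L : List (String × String))
    (hL : ∀ p ∈ L, p.1 ≠ w) (bi : Nat) (bg : Option String) :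
    L.foldl (pvStepB (w :: ws)) (bi + 1, bg)
      = ((L.foldl (pvStepB ws) (bi, bg)).1 + 1, (L.foldl (pvStepB ws) (bi, bg)).2) := by
  induction L generalizing bi bg with
  | nil => rfl
  | cons p L ih =>
    have hp : p.1 ≠ w := hL p (List.mem_cons_self)
    have hL' : ∀ q ∈ L, q.1 ≠ w := fun q hq => hL q (List.mem_cons_of_mem p hq)
    have hidx := PySem.List.index?_cons_of_ne (x := w) (v := p.1) ws (fun h => hp h.symm)
    simp only [List.foldl_cons, pvStepB, hidx]
    cases h : PySem.List.index? ws p.1 with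
    | none => simp only [Option.map_none]; exact ih hL' bi bg
    | some j =>
      simp only [Option.map_some]
      by_cases hj : j < bi
      · rw [if_pos (by omega), if_pos hj]; exact ih hL' j (some p.2)
      · rw [if_neg (by omega), if_neg hj]; exact ih hL' bi bg

-- flattening a genres table into keyword→genre pairs
def pvFlat (gs : List (String × List String)) : List (String × String) :=
  gs.flatMap (fun q => q.2.map (fun k => (k, q.1)))

-- find? over one mapped keyword list, seen through the genre projection
theorem pv_find_map (kws : List String) (g w : String) :
    ((kws.map (fun k => (k, g))).find? (fun p => p.1 == w)).map Prod.snd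
      = (if kws.contains w then some g else none) := by
  induction kws with
  | nil => simp
  | cons k kws ih =>
    by_cases hk : k = w
    · simp [hk]
    · rw [List.map_cons, List.find?_cons_of_neg (by simp [hk]), ih]
      have hw : ¬ w = k := fun hh => hk hh.symm
      by_cases h : kws.contains w
      · simp [hw]
      · simp [hw]

-- A's genre scan = first matching pair in the flattened table
theorem pv_scan_eq_find (gs : List (String × List String)) (w : String) :
    pvScanGenres gs w = ((pvFlat gs).find? (fun p => p.1 == w)).map Prod.snd := by
  induction gs with
  | nil => simp [pvScanGenres, pvFlat]
  | cons q gs ih =>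
    obtain ⟨g, kws⟩ := q
    simp only [pvScanGenres, pvFlat, List.flatMap_cons, List.find?_append]
    have hm := pv_find_map kws g w
    by_cases h : kws.contains w
    · rw [if_pos h] at hm
      cases hfind : (kws.map (fun k => (k, g))).find? (fun p => p.1 == w) with
      | none => rw [hfind] at hm; simp at hm
      | some p =>
        rw [hfind] at hm
        rw [if_pos h, Option.some_or]
        exact hm.symm
    · rw [if_neg h] at hm
      have hnone : (kws.map (fun k => (k, g))).find? (fun p => p.1 == w) = none :=
        Option.map_eq_none_iff.mp hm
      rw [if_neg h, hnone, Option.none_or, ih, pvFlat]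

theorem pv_pairs_eq_flat : pvPairs = pvFlat pvGenres := by decide

-- the main loop equivalence
theorem pv_main (ws : List String) :
    (pvPairs.foldl (pvStepB ws) (ws.length, none)).2 = pvLoopA ws := by
  induction ws with
  | nil => rw [pv_fold_nil]; rfl
  | cons w ws ih =>
    simp only [pvLoopA]
    cases hfind : pvPairs.find? (fun p => p.1 == w) with
    | some p0 =>
      have hscan : pvScanGenres pvGenres w = some p0.2 := by
        rw [pv_scan_eq_find, ← pv_pairs_eq_flat, hfind]; rfl
      rw [hscan]
      exact pv_fold_hit w ws pvPairs (ws.length + 1) none (Nat.succ_pos _) p0 hfind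
    | none =>
      have hscan : pvScanGenres pvGenres w = none := by
        rw [pv_scan_eq_find, ← pv_pairs_eq_flat, hfind]; rfl
      rw [hscan]
      have hL : ∀ p ∈ pvPairs, p.1 ≠ w := by
        intro p hp
        have := List.find?_eq_none.mp hfind p hp
        simpa using this
      have hs := pv_fold_shift w ws pvPairs hL ws.length none
      rw [List.length_cons, hs]
      exact ih

-- ===== VERDICT (by name: the statement is the Claim_ definition above) =====
theorem extract_genre_spec : Claim_equal_extract_genre := by
  intro sentence _
  unfold Spec_extract_genre extract_genre extract_genre_alt
  exact (pv_main _).symm
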